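-- pv_equiv track=rewrite | github.com/rmlopes/code | examples/gearnet_ant.py | python_filter
-- ===== SOURCE A (Python) =====
-- def python_filter(txt):
--     """ Create correct python syntax.
--     We use {: and :} as special open and close brackets, because
--     it's not possible to specify indentation correctly in a BNF
--     grammar without this type of scheme."""
--     indent_level = 0
--     tmp = txt[:]
--     i = 0
--     while i < len(tmp):
--       tok = tmp[i:i+2]
--       if tok == "{:":
--         indent_level += 1
--       elif tok == ":}":
--         indent_level -= 1
--       tabstr = "\n" + "  " * indent_level
--       if tok == "{:" or tok == ":}" or tok == "\\n":
--         tmp = tmp.replace(tok, tabstr, 1)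
--       i += 1
--     # Strip superfluous blank lines.
--     txt = "\n".join([line for line in tmp.split("\n") if line.strip() != ""])
--     return txt
-- ===== SOURCE B (Python) =====
-- # Single forward tokenizer: consume each bracket token once and emit its
-- # indentation string into a piece list (instead of repeated first-occurrence
-- # replace on a mutating string that is then re-scanned).
-- _TOKENS = {"{:": 1, ":}": -1, "\\n": 0}
--
-- def python_filter(txt):
--     pieces = []
--     indent = 0
--     i = 0
--     n = len(txt)
--     while i < n:
--         delta = _TOKENS.get(txt[i:i+2])
--         if delta is None:
--             pieces.append(txt[i])
--             i += 1
--         else: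
--             indent += delta
--             pieces.append("\n" + "  " * indent)
--             i += 2
--     tmp = "".join(pieces)
--     return "\n".join(line for line in tmp.split("\n") if line.strip() != "")
-- ===== Notes on version B (the rewrite author's own statement) =====
-- stated objective: alternative
-- what changed: B tokenizes the input in one forward pass, consuming each {: / :} / \n token once and appending its indentation string to a piece list, instead of A's index loop that repeatedly calls first-occurrence str.replace on the mutating string and then re-scans the freshly inserted indentation characters.
import Mathlib
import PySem

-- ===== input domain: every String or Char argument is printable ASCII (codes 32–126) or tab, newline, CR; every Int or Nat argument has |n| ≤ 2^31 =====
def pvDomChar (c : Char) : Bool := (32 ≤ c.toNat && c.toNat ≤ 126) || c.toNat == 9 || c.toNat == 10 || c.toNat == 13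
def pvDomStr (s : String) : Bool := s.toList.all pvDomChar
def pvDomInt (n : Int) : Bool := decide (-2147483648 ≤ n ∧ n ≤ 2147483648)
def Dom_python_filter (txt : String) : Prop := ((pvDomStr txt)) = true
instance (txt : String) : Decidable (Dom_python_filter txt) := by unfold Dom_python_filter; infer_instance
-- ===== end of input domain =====

-- B replaces A's repeated first-occurrence `str.replace` on a mutating, re-scanned
-- string by a single forward tokenizer that consumes each bracket token once and
-- appends its indentation string to a piece list (objective: alternative;
-- equality of the return value is proved below).

-- ===== PORT A =====
-- hand port of s.replace(old, new, 1) for a NONEMPTY pattern (exact there;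
-- A only calls it with the 2-char patterns "{:", ":}", "\n")
def pvReplaceFirst (pat rep : List Char) : List Char → List Char
  | [] => []
  | c :: s =>
    if pat.isPrefixOf (c :: s) then rep ++ (c :: s).drop pat.length
    else c :: pvReplaceFirst pat rep s

-- A's while loop over the mutating string; fuel only makes the recursion total
-- (the loop always terminates: pvT_le below shows (|tmp|+2)^2 steps suffice)
def pvLoopA : Nat → List Char → Nat → Int → List Char
  | 0, tmp, _, _ => tmp
  | fuel + 1, tmp, i, indent =>
    if i < tmp.length then
      -- tok = tmp[i:i+2] (0 ≤ i, so drop/take is exact)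
      let tok := (tmp.drop i).take 2
      let indent' := if tok = ['{', ':'] then indent + 1
                     else if tok = [':', '}'] then indent - 1 else indent
      -- tabstr = "\n" + "  " * indent_level
      let tab := '\n' :: PySem.List.pyRepeat [' ', ' '] indent'
      let tmp' := if tok = ['{', ':'] ∨ tok = [':', '}'] ∨ tok = ['\\', 'n']
                  then pvReplaceFirst tok tab tmp else tmp
      pvLoopA fuel tmp' (i + 1) indent'
    else tmp

-- "\n".join([line for line in tmp.split("\n") if line.strip() != ""])  (shared final line of both Pythons)
def pvStripBlanks (tmp : List Char) : List Char :=
  PySem.Chars.join ['\n']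
    ((PySem.Chars.splitOn tmp ['\n']).filter (fun line => PySem.Chars.strip line != []))

def python_filter (txt : String) : String :=
  String.mk (pvStripBlanks (pvLoopA ((txt.toList.length + 2) ^ 2) txt.toList 0 0))

-- ===== PORT B =====
-- _TOKENS.get(txt[i:i+2])
def pvTokDelta (tok : List Char) : Option Int :=
  if tok = ['{', ':'] then some 1
  else if tok = [':', '}'] then some (-1)
  else if tok = ['\\', 'n'] then some 0
  else none

-- B's while loop: consume one char or one 2-char token, appending to `pieces`
def pvEmitB : List Char → Int → List (List Char) → List (List Char)
  | [], _, pieces => pieces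
  | c :: s, indent, pieces =>
    match pvTokDelta ((c :: s).take 2) with
    | some δ => pvEmitB (s.drop 1) (indent + δ)
        (pieces ++ ['\n' :: PySem.List.pyRepeat [' ', ' '] (indent + δ)])
    | none => pvEmitB s indent (pieces ++ [[c]])
termination_by s _ _ => s.length
decreasing_by all_goals (simp; try omega)

def python_filter_alt (txt : String) : String :=
  String.mk (pvStripBlanks (PySem.Chars.join [] (pvEmitB txt.toList 0 [])))

-- ===== PRECONDITION & SPEC =====
def Spec_python_filter (txt : String) (out : String) : Prop := out = python_filter_alt txt
instance (txt : String) (out : String) : Decidable (Spec_python_filter txt out) := by unfold Spec_python_filter; infer_instance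

-- ===== CLAIM (what is proved, stated in full; the proofs are below) =====
def Claim_equal_python_filter : Prop := ∀ (txt : String), Dom_python_filter txt → Spec_python_filter txt (python_filter txt)

-- ===== LEMMAS AND PROOFS =====

-- clean emitted form both ports compute (proof-only)
def pvEmit : List Char → Int → List Char
  | [], _ => []
  | c :: s, d =>
    match pvTokDelta ((c :: s).take 2) with
    | some δ => ('\n' :: List.replicate (2 * (d + δ).toNat) ' ') ++ pvEmit (s.drop 1) (d + δ)
    | none => c :: pvEmit s d
termination_by s _ => s.length
decreasing_by all_goals (simp; try omega)

-- step budget of the remaining suffix (proof-only)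
def pvT : List Char → Int → Nat
  | [], _ => 0
  | c :: s, d =>
    match pvTokDelta ((c :: s).take 2) with
    | some δ => 1 + 2 * (d + δ).toNat + pvT (s.drop 1) (d + δ)
    | none => 1 + pvT s d
termination_by s _ => s.length
decreasing_by all_goals (simp; try omega)

def pvWs (l : List Char) : Prop := ∀ c ∈ l, c = ' ' ∨ c = '\n'

def pvIsTok (a : Char) (b : Option Char) : Prop :=
  (a = '{' ∧ b = some ':') ∨ (a = ':' ∧ b = some '}') ∨ (a = '\\' ∧ b = some 'n')

-- no token starts inside `l` (including straddling into `r`)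
def pvClean : List Char → List Char → Prop
  | [], _ => True
  | a :: l, r => ¬ pvIsTok a ((l ++ r).head?) ∧ pvClean l r

lemma pvRepeat_pair (d : Int) :
    PySem.List.pyRepeat [' ', ' '] d = List.replicate (2 * d.toNat) ' ' := by
  unfold PySem.List.pyRepeat
  generalize d.toNat = n
  induction n with
  | zero => rfl
  | succ n ih =>
      have h2 : 2 * (n + 1) = (2 * n) + 1 + 1 := by ring
      simp [List.replicate_succ, ih, h2]

lemma pvTokDelta_some_cases {t : List Char} {δ : Int} (h : pvTokDelta t = some δ) :
    (t = ['{', ':'] ∧ δ = 1) ∨ (t = [':', '}'] ∧ δ = -1) ∨ (t = ['\\', 'n'] ∧ δ = 0) := by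
  unfold pvTokDelta at h
  split_ifs at h <;> simp_all

lemma pvTokDelta_none {t : List Char} (h : pvTokDelta t = none) :
    t ≠ ['{', ':'] ∧ t ≠ [':', '}'] ∧ t ≠ ['\\', 'n'] := by
  unfold pvTokDelta at h
  split_ifs at h <;> simp_all

lemma pvTokDelta_none_notTok {c : Char} {s : List Char}
    (h : pvTokDelta ((c :: s).take 2) = none) : ¬ pvIsTok c s.head? := by
  cases s with
  | nil => rintro (⟨_, hb⟩ | ⟨_, hb⟩ | ⟨_, hb⟩) <;> simp at hb
  | cons b t =>
      obtain ⟨h1, h2, h3⟩ := pvTokDelta_none h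
      rintro (⟨rfl, hb⟩ | ⟨rfl, hb⟩ | ⟨rfl, hb⟩) <;> simp_all

lemma pvNotTok_newline (a : Char) : ¬ pvIsTok a (some '\n') := by
  rintro (⟨_, hb⟩ | ⟨_, hb⟩ | ⟨_, hb⟩) <;> simp at hb

lemma pvClean_append (l₁ l₂ r : List Char) :
    pvClean (l₁ ++ l₂) r ↔ pvClean l₁ (l₂ ++ r) ∧ pvClean l₂ r := by
  induction l₁ with
  | nil => simp [pvClean]
  | cons a l ih => simp [pvClean, ih, List.append_assoc, and_assoc]

lemma pvClean_ws (l r : List Char) (h : pvWs l) : pvClean l r := by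
  induction l with
  | nil => trivial
  | cons a l ih =>
      refine ⟨?_, ih (fun c hc => h c (List.mem_cons_of_mem _ hc))⟩
      rcases h a (List.mem_cons_self) with rfl | rfl <;>
        rintro (⟨ha, _⟩ | ⟨ha, _⟩ | ⟨ha, _⟩) <;> exact absurd ha (by decide)

lemma pvClean_congr_head (l : List Char) {r r' : List Char}
    (h : ∀ a, pvIsTok a r'.head? → pvIsTok a r.head?) : pvClean l r → pvClean l r' := by
  induction l with
  | nil => intro; trivial
  | cons a l ih =>
      rintro ⟨h1, h2⟩
      refine ⟨?_, ih h2⟩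
      cases l with
      | nil => simpa using fun ht => h1 (h a (by simpa using ht))
      | cons b t => simpa using h1

lemma pvReplaceFirst_at (t0 t1 : Char) (tab : List Char) (pre rest : List Char)
    (htok : pvIsTok t0 (some t1)) (hcl : pvClean pre (t0 :: t1 :: rest)) :
    pvReplaceFirst [t0, t1] tab (pre ++ t0 :: t1 :: rest) = pre ++ tab ++ rest := by
  induction pre with
  | nil => simp [pvReplaceFirst, List.isPrefixOf]
  | cons a pre ih =>
      obtain ⟨h1, h2⟩ := hcl
      have hnp : ¬ ([t0, t1].isPrefixOf (a :: (pre ++ t0 :: t1 :: rest)) = true) := by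
        intro hp
        cases hx : pre ++ t0 :: t1 :: rest with
        | nil => cases pre <;> simp_all
        | cons b ys =>
            rw [hx] at hp
            simp [List.isPrefixOf] at hp
            obtain ⟨rfl, rfl⟩ := hp
            exact h1 (by simpa [hx] using htok)
      simp only [List.cons_append, pvReplaceFirst]
      rw [if_neg hnp, ih h2]

lemma pvFlatten_emitB (s : List Char) (d : Int) (ps : List (List Char)) :
    (pvEmitB s d ps).flatten = ps.flatten ++ pvEmit s d := by
  induction s, d, ps using pvEmitB.induct with
  | case1 => simp [pvEmitB, pvEmit]
  | case2 c s indent ps δ h ih =>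
      rw [pvEmitB.eq_def, pvEmit.eq_def]
      simp only [h]
      rw [ih]
      simp [pvRepeat_pair]
  | case3 c s indent ps h ih =>
      rw [pvEmitB.eq_def, pvEmit.eq_def]
      simp only [h]
      rw [ih]
      simp

lemma pvJoin_nil (ps : List (List Char)) : PySem.Chars.join [] ps = ps.flatten := by
  induction ps with
  | nil => rfl
  | cons p ps ih =>
      cases ps with
      | nil => simp [PySem.Chars.join, List.intercalate]
      | cons q ps' =>
          have h : List.intercalate ([] : List Char) (p :: q :: ps')
              = p ++ List.intercalate [] (q :: ps') := by
            simp [List.intercalate, List.intersperse]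
          simp only [PySem.Chars.join] at ih ⊢
          rw [h, ih]
          simp

lemma pvT_pos (c : Char) (s : List Char) (d : Int) : 0 < pvT (c :: s) d := by
  cases h : pvTokDelta ((c :: s).take 2) <;> simp only [pvT, h] <;> omega

lemma pvT_le (r : List Char) (d : Int) : pvT r d ≤ (d.toNat + r.length + 2) ^ 2 := by
  induction r, d using pvT.induct with
  | case1 => simp [pvT]
  | case2 c s d δ h ih =>
      cases s with
      | nil => simp [pvTokDelta] at h
      | cons t1 s' =>
          have hδ : δ = 1 ∨ δ = -1 ∨ δ = 0 := by
            rcases pvTokDelta_some_cases h with ⟨_, h'⟩ | ⟨_, h'⟩ | ⟨_, h'⟩ <;> simp [h']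
          have hx : (d + δ).toNat ≤ d.toNat + 1 := by rcases hδ with rfl | rfl | rfl <;> omega
          rw [pvT.eq_def]
          simp only [h, List.drop_one, List.tail_cons, List.length_cons]
          simp only [List.drop_one, List.tail_cons] at ih
          have hmono : ((d + δ).toNat + s'.length + 2) ^ 2 ≤ (d.toNat + s'.length + 3) ^ 2 :=
            Nat.pow_le_pow_left (by omega) 2
          have hsq : (d.toNat + (s'.length + 1 + 1) + 2) ^ 2
              = (d.toNat + s'.length + 3) ^ 2 + 2 * (d.toNat + s'.length + 3) + 1 := by ring
          linarith [ih, hmono, hx]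
  | case3 c s d h ih =>
      rw [pvT.eq_def]
      simp only [h, List.length_cons]
      have hsq : (d.toNat + (s.length + 1) + 2) ^ 2
          = (d.toNat + s.length + 2) ^ 2 + 2 * (d.toNat + s.length + 2) + 1 := by ring
      linarith [ih]

-- after A has replaced a token at the boundary: resume the scan one position into
-- the freshly inserted indentation string
lemma pvSim_step (fuel : Nat) (pre s' : List Char) (d δ : Int)
    (hf : 2 * (d + δ).toNat + pvT s' (d + δ) ≤ fuel)
    (IH : ∀ pre w r d, pvWs w → pvClean (pre ++ w) r → w.length + pvT r d ≤ fuel →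
        pvLoopA fuel (pre ++ (w ++ r)) pre.length d = pre ++ (w ++ pvEmit r d))
    (hcl : pvClean pre ('\n' :: (List.replicate (2 * (d + δ).toNat) ' ' ++ s'))) :
    pvLoopA fuel (pre ++ ('\n' :: (List.replicate (2 * (d + δ).toNat) ' ' ++ s')))
        (pre.length + 1) (d + δ)
      = pre ++ (('\n' :: List.replicate (2 * (d + δ).toNat) ' ') ++ pvEmit s' (d + δ)) := by
  have h1 : pre ++ ('\n' :: (List.replicate (2 * (d + δ).toNat) ' ' ++ s'))
      = (pre ++ ['\n']) ++ (List.replicate (2 * (d + δ).toNat) ' ' ++ s') := by simp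
  have h2 : pre.length + 1 = (pre ++ ['\n']).length := by simp
  have hcl2 : pvClean ((pre ++ ['\n']) ++ List.replicate (2 * (d + δ).toNat) ' ') s' := by
    rw [pvClean_append]
    refine ⟨?_, pvClean_ws _ _ (fun c hc => Or.inl (List.eq_of_mem_replicate hc))⟩
    rw [pvClean_append]
    refine ⟨by simpa using hcl, ?_⟩
    exact pvClean_ws _ _ (fun c hc => by simp at hc; simp [hc])
  rw [h1, h2, IH (pre ++ ['\n']) (List.replicate (2 * (d + δ).toNat) ' ') s' (d + δ)
        (fun c hc => Or.inl (List.eq_of_mem_replicate hc)) hcl2 (by simpa using hf)]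
  simp

lemma pvLoopA_sim (fuel : Nat) (pre w r : List Char) (d : Int)
    (hw : pvWs w) (hcl : pvClean (pre ++ w) r) (hf : w.length + pvT r d ≤ fuel) :
    pvLoopA fuel (pre ++ (w ++ r)) pre.length d = pre ++ (w ++ pvEmit r d) := by
  induction fuel generalizing pre w r d with
  | zero =>
      have hw0 : w = [] := by
        cases w with
        | nil => rfl
        | cons a t => simp at hf
      have hr0 : r = [] := by
        cases r with
        | nil => rfl
        | cons c s => have := pvT_pos c s d; omega
      subst hw0; subst hr0
      simp [pvLoopA, pvEmit]
  | succ fuel ih =>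
      cases w with
      | cons c w' =>
          have hlen : pre.length < (pre ++ (c :: w' ++ r)).length := by simp
          have hc := hw c (List.mem_cons_self)
          simp only [pvLoopA]
          rw [if_pos hlen]
          rw [List.drop_left]
          have htake : ((c :: w' ++ r)).take 2 = c :: (w' ++ r).take 1 := by simp
          have h1 : ¬ (c :: (w' ++ r).take 1 = ['{', ':']) := by
            rcases hc with rfl | rfl <;> simp
          have h2 : ¬ (c :: (w' ++ r).take 1 = [':', '}']) := by
            rcases hc with rfl | rfl <;> simp
          have h3 : ¬ (c :: (w' ++ r).take 1 = ['\\', 'n']) := by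
            rcases hc with rfl | rfl <;> simp
          rw [htake, if_neg h1, if_neg h2, if_neg (by tauto : ¬ (c :: (w' ++ r).take 1 = ['{', ':'] ∨ c :: (w' ++ r).take 1 = [':', '}'] ∨ c :: (w' ++ r).take 1 = ['\\', 'n']))]
          have hre : pre ++ (c :: w' ++ r) = (pre ++ [c]) ++ (w' ++ r) := by simp
          have hix : pre.length + 1 = (pre ++ [c]).length := by simp
          rw [hre, hix]
          have hcl' : pvClean ((pre ++ [c]) ++ w') r := by
            have : (pre ++ [c]) ++ w' = pre ++ (c :: w') := by simp
            rw [this]; exact hcl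
          have := ih (pre ++ [c]) w' r d
            (fun x hx => hw x (List.mem_cons_of_mem _ hx)) hcl'
            (by simp at hf ⊢; omega)
          rw [this]
          simp
      | nil =>
          cases r with
          | nil => simp [pvLoopA, pvEmit]
          | cons c s =>
              show pvLoopA (fuel + 1) (pre ++ (c :: s)) pre.length d
                  = pre ++ pvEmit (c :: s) d
              rw [List.append_nil] at hcl
              simp only [pvLoopA]
              rw [if_pos (by simp : pre.length < (pre ++ (c :: s)).length)]
              rw [List.drop_left]
              cases htd : pvTokDelta ((c :: s).take 2) with
              | none =>
                  obtain ⟨h1, h2, h3⟩ := pvTokDelta_none htd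
                  rw [if_neg h1, if_neg h2, if_neg (by tauto)]
                  have hcl' : pvClean ((pre ++ [c]) ++ []) s := by
                    rw [List.append_nil]
                    rw [pvClean_append]
                    refine ⟨by simpa using hcl, ?_, trivial⟩
                    simpa using pvTokDelta_none_notTok htd
                  have hfs : ([] : List Char).length + pvT s d ≤ fuel := by
                    rw [pvT.eq_def] at hf; simp only [htd] at hf; simp at hf ⊢; omega
                  have th := ih (pre ++ [c]) [] s d (by intro x hx; simp at hx) hcl' hfs
                  simp only [List.nil_append] at th
                  rw [show pre ++ c :: s = (pre ++ [c]) ++ s by simp,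
                      show pre.length + 1 = (pre ++ [c]).length by simp, th]
                  simp only [pvEmit, htd]
                  simp
              | some δ =>
                  cases s with
                  | nil => simp [pvTokDelta] at htd
                  | cons t1 s' =>
                      have htake : ((c :: t1 :: s')).take 2 = [c, t1] := by simp
                      rw [htake] at htd
                      have hfs : pvT (c :: t1 :: s') d ≤ fuel + 1 := by simpa using hf
                      rw [pvT.eq_def] at hfs
                      simp only [htake, htd, List.drop_one, List.tail_cons] at hfs
                      rw [htake]
                      rcases pvTokDelta_some_cases htd with ⟨hteq, hδ⟩ | ⟨hteq, hδ⟩ | ⟨hteq, hδ⟩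
                      · -- tok = "{:" , δ = 1
                        simp only [List.cons.injEq, and_true] at hteq
                        obtain ⟨rfl, rfl⟩ := hteq
                        subst hδ
                        rw [if_pos (show ['{',':'] = ['{',':'] from rfl),
                            if_pos (show ['{',':'] = ['{',':'] ∨ ['{',':'] = [':','}'] ∨ ['{',':'] = ['\\','n'] from Or.inl rfl)]
                        rw [pvReplaceFirst_at _ _ _ _ _ (Or.inl ⟨rfl, rfl⟩) hcl]
                        rw [pvRepeat_pair]
                        have hsh : pre ++ ('\n' :: List.replicate (2 * (d + 1).toNat) ' ') ++ s'
                            = pre ++ ('\n' :: (List.replicate (2 * (d + 1).toNat) ' ' ++ s')) := by simp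
                        rw [hsh, pvSim_step fuel pre s' d 1 (by omega) ih
                              (pvClean_congr_head pre
                                (fun a ht => absurd (by simpa using ht) (pvNotTok_newline a)) hcl)]
                        conv_rhs => rw [pvEmit.eq_def]
                        simp [htd]
                      · -- tok = ":}" , δ = -1
                        simp only [List.cons.injEq, and_true] at hteq
                        obtain ⟨rfl, rfl⟩ := hteq
                        subst hδ
                        rw [if_neg (show ¬([':','}'] = ['{',':']) by decide),
                            if_pos (show [':','}'] = [':','}'] from rfl),
                            if_pos (show [':','}'] = ['{',':'] ∨ [':','}'] = [':','}'] ∨ [':','}'] = ['\\','n'] from Or.inr (Or.inl rfl))]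
                        rw [pvReplaceFirst_at _ _ _ _ _ (Or.inr (Or.inl ⟨rfl, rfl⟩)) hcl]
                        rw [pvRepeat_pair, show d - 1 = d + -1 from by ring]
                        have hsh : pre ++ ('\n' :: List.replicate (2 * (d + -1).toNat) ' ') ++ s'
                            = pre ++ ('\n' :: (List.replicate (2 * (d + -1).toNat) ' ' ++ s')) := by simp
                        rw [hsh, pvSim_step fuel pre s' d (-1) (by omega) ih
                              (pvClean_congr_head pre
                                (fun a ht => absurd (by simpa using ht) (pvNotTok_newline a)) hcl)]
                        conv_rhs => rw [pvEmit.eq_def]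
                        simp [htd]
                      · -- tok = "\\n" (backslash n) , δ = 0
                        simp only [List.cons.injEq, and_true] at hteq
                        obtain ⟨rfl, rfl⟩ := hteq
                        subst hδ
                        rw [if_neg (show ¬(['\\','n'] = ['{',':']) by decide),
                            if_neg (show ¬(['\\','n'] = [':','}']) by decide),
                            if_pos (show ['\\','n'] = ['{',':'] ∨ ['\\','n'] = [':','}'] ∨ ['\\','n'] = ['\\','n'] from Or.inr (Or.inr rfl))]
                        rw [pvReplaceFirst_at _ _ _ _ _ (Or.inr (Or.inr ⟨rfl, rfl⟩)) hcl]
                        rw [pvRepeat_pair]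
                        have hsh : pre ++ ('\n' :: List.replicate (2 * d.toNat) ' ') ++ s'
                            = pre ++ ('\n' :: (List.replicate (2 * d.toNat) ' ' ++ s')) := by simp
                        have hstep := pvSim_step fuel pre s' d 0 (by omega) ih
                              (pvClean_congr_head pre
                                (fun a ht => absurd (by simpa using ht) (pvNotTok_newline a)) hcl)
                        simp only [add_zero] at hstep
                        rw [hsh, hstep]
                        conv_rhs => rw [pvEmit.eq_def]
                        simp [htd]


theorem python_filter_spec : Claim_equal_python_filter := by
  intro txt _
  unfold Spec_python_filter python_filter python_filter_alt
  have hsim := pvLoopA_sim ((txt.toList.length + 2) ^ 2) [] [] txt.toList 0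
    (by intro c hc; simp at hc) trivial (by simpa using pvT_le txt.toList 0)
  simp only [List.nil_append, List.length_nil] at hsim
  rw [hsim, pvJoin_nil, pvFlatten_emitB]
  simp
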